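-- pv_equiv track=rewrite | github.com/chirag26495/IDD-X | Step6_train_and_evaluate_Important_Object_Selector.py | prepLabelsDS
-- ===== SOURCE A (Python) =====
-- import os, copy, random
--
-- def prepLabelsDS(all_labels, num_samples=None, batch_size = 15):   ### batch size should be a multiple of N -> no. of classes
--     S = dict()
--     c_max = 0
--     for idx in range(len(all_labels)):
--         label = all_labels[idx]
--         if label not in S:
--             S[label] = list()
--         S[label].append(idx)
--         if(len(S[label]) > c_max):
--             c_max = len(S[label])
--     N = len(S)
--     if(num_samples is not None):
--         c_max = num_samples//N
--     Sbkp = copy.deepcopy(S)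
--     return Sbkp, c_max
-- ===== SOURCE B (Python) =====
-- def prepLabelsDS(all_labels, num_samples=None, batch_size=15):
--     # label-major: for each distinct label (first-occurrence order), collect
--     # its indices by a full scan; correct since each index lands exactly in
--     # its own label's bucket, in increasing order, as in the index-major build
--     labels = list(dict.fromkeys(all_labels))
--     S = {lab: [i for i, x in enumerate(all_labels) if x == lab] for lab in labels}
--     if num_samples is not None:
--         c_max = num_samples // len(labels)
--     else:
--         c_max = max((len(v) for v in S.values()), default=0)
--     return S, c_max
-- ===== Notes on version B (the rewrite author's own statement) =====
-- stated objective: alternative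
-- what changed: B is label-major: it first lists the distinct labels (dict.fromkeys), then builds each bucket by a separate full scan of all_labels, and computes c_max afterwards from the bucket lengths; A is index-major, growing the dict and tracking the max inside one pass over indices (and deep-copying the dict). B trades a single O(n) pass for O(n*k) nested scans.
import Mathlib
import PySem

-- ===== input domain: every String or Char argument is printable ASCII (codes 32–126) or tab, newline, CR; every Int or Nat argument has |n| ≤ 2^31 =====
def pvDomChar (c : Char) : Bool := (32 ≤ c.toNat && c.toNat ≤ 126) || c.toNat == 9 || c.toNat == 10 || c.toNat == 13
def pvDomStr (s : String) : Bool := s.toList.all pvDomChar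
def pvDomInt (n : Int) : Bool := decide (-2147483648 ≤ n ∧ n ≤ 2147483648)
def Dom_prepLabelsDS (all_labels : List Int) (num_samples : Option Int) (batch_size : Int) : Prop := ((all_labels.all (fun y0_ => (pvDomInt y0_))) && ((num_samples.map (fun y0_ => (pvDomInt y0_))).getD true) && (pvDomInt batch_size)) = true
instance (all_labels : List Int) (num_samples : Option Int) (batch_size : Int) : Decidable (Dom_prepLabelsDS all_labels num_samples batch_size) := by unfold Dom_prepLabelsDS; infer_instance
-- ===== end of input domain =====

-- B rebuilds the result label-major: distinct labels first, then one full scan per label to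
-- collect its bucket, with c_max reduced from the bucket lengths afterwards (no deepcopy);
-- alternative decomposition, same values.


-- ===== PORT A =====
-- for idx in range(len(all_labels)): idx is always in range, so pyGetD is exact for all_labels[idx].
-- S[label].append(idx) with the key present is Dict.modify label [] (· ++ [idx]).
-- copy.deepcopy(S) is the identity on the immutable Lean value.
def prepLabelsDS (all_labels : List Int) (num_samples : Option Int) (batch_size : Int) : (List (Int × List Int)) × Int :=
  let st := (PySem.List.pyRange 0 (PySem.List.len all_labels) 1).foldl
    (fun (st : PySem.Dict Int (List Int) × Int) idx =>
      let label := PySem.List.pyGetD all_labels idx 0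
      let S := if st.1.contains label then st.1 else st.1.insert label []
      let S := S.modify label [] (fun v => v ++ [idx])
      (S, if ((S.getD label []).length : Int) > st.2 then ((S.getD label []).length : Int) else st.2))
    (PySem.Dict.empty, (0 : Int))
  let S := st.1
  let c_max : Int :=
    match num_samples with
    | some ns => PySem.Int.floordiv ns (PySem.Dict.size S)  -- num_samples//N; N = 0 (empty input) raises in Python, excluded by Pre_
    | none => st.2
  (S.items, c_max)

-- ===== PORT B =====
-- list(dict.fromkeys(all_labels)) is PySem.List.dedup; the dict comprehension over labels is a map;
-- each bucket is [i for i, x in enumerate(all_labels) if x == lab], a filter of enumerate.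
def prepLabelsDS_alt (all_labels : List Int) (num_samples : Option Int) (batch_size : Int) : (List (Int × List Int)) × Int :=
  let labels := PySem.List.dedup all_labels
  let S := labels.map (fun lab =>
    (lab, ((PySem.List.enumerate all_labels).filter (fun p => p.2 == lab)).map (fun p => p.1)))
  let c_max : Int :=
    match num_samples with
    | some ns => PySem.Int.floordiv ns (PySem.List.len labels)  -- num_samples // len(labels); raises when empty, excluded by Pre_
    | none => (S.map (fun p => (p.2.length : Int))).foldl max 0  -- max(…, default=0): exact since lengths ≥ 0
  (S, c_max)

-- ===== PRECONDITION & SPEC =====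
-- Pre_ excludes exactly the inputs where A raises ZeroDivisionError (num_samples given with an
-- empty label list, so N == 0); B raises there too.
def Pre_prepLabelsDS (all_labels : List Int) (num_samples : Option Int) (batch_size : Int) : Prop :=
  num_samples.isSome → all_labels ≠ []
instance (all_labels : List Int) (num_samples : Option Int) (batch_size : Int) : Decidable (Pre_prepLabelsDS all_labels num_samples batch_size) := by unfold Pre_prepLabelsDS; infer_instance
def pvWitness_prepLabelsDS : List Int × Option Int × Int := ([0, 2, 0, 1], some 9, 15)

def Spec_prepLabelsDS (all_labels : List Int) (num_samples : Option Int) (batch_size : Int) (out : (List (Int × List Int)) × Int) : Prop := out = prepLabelsDS_alt all_labels num_samples batch_size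
instance (all_labels : List Int) (num_samples : Option Int) (batch_size : Int) (out : (List (Int × List Int)) × Int) : Decidable (Spec_prepLabelsDS all_labels num_samples batch_size out) := by unfold Spec_prepLabelsDS; infer_instance

-- ===== CLAIM (what is proved, stated in full; the proofs are below) =====
def Claim_equal_prepLabelsDS : Prop := ∀ (all_labels : List Int) (num_samples : Option Int) (batch_size : Int), Dom_prepLabelsDS all_labels num_samples batch_size → Pre_prepLabelsDS all_labels num_samples batch_size → Spec_prepLabelsDS all_labels num_samples batch_size (prepLabelsDS all_labels num_samples batch_size)

-- ===== LEMMAS AND PROOFS =====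

-- maximum bucket length of a dict, as a fold over its values
def pvMaxLen (d : PySem.Dict Int (List Int)) : Int :=
  (d.values.map (fun v => (v.length : Int))).foldl max 0

lemma pv_foldmax_init (ks : List Int) (h : Int → Int) (a b : Int) :
    ks.foldl (fun m j => max m (h j)) (max a b) = max (ks.foldl (fun m j => max m (h j)) a) b := by
  induction ks generalizing a with
  | nil => simp
  | cons k ks ih =>
      simp only [List.foldl_cons]
      rw [show max (max a b) (h k) = max (max a (h k)) b by omega, ih]

lemma pv_foldmax_congr (ks : List Int) (h h' : Int → Int) (a : Int)
    (hc : ∀ j ∈ ks, h j = h' j) :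
    ks.foldl (fun m j => max m (h j)) a = ks.foldl (fun m j => max m (h' j)) a := by
  induction ks generalizing a with
  | nil => rfl
  | cons k ks ih =>
      simp only [List.foldl_cons]
      rw [hc k (by simp), ih _ (fun j hj => hc j (by simp [hj]))]

lemma pv_foldmax_bump (ks : List Int) (h : Int → Int) (k : Int) (a : Int) (hk : k ∈ ks) :
    ks.foldl (fun m j => max m (if j = k then h k + 1 else h j)) a
      = max (ks.foldl (fun m j => max m (h j)) a) (h k + 1) := by
  induction ks generalizing a with
  | nil => cases hk
  | cons x ks ih =>
      simp only [List.foldl_cons]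
      by_cases hxk : x = k
      · subst hxk
        rw [if_pos rfl]
        by_cases hmem : x ∈ ks
        · rw [ih _ hmem,
            show max a (h x + 1) = max (max a (h x)) (h x + 1) by omega,
            pv_foldmax_init]
          omega
        · rw [pv_foldmax_congr ks (fun j => if j = x then h x + 1 else h j) h _
              (fun j hj => by
                have hne : j ≠ x := fun e => hmem (by rwa [e] at hj)
                simp only [if_neg hne]),
            show max a (h x + 1) = max (max a (h x)) (h x + 1) by omega,
            pv_foldmax_init, pv_foldmax_init]
      · have hk' : k ∈ ks := by
          rcases hk with _ | h'; · exact absurd rfl hxk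
          · assumption
        rw [if_neg hxk, ih _ hk']

lemma pv_maxLen_keys (d : PySem.Dict Int (List Int)) (hnd : d.keys.Nodup) :
    pvMaxLen d = d.keys.foldl (fun m j => max m ((d.getD j []).length : Int)) 0 := by
  unfold pvMaxLen
  rw [PySem.Dict.values_eq_map_keys d hnd ([] : List Int), List.map_map, List.foldl_map]
  rfl

-- appending one index to bucket k bumps the max to max(old, len+1)
lemma pv_maxLen_insert (d : PySem.Dict Int (List Int)) (k i : Int) (hnd : d.keys.Nodup) :
    pvMaxLen (d.insert k (d.getD k [] ++ [i]))
      = max (pvMaxLen d) (((d.getD k []).length : Int) + 1) := by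
  by_cases hc : d.contains k = true
  · have hkeys : (d.insert k (d.getD k [] ++ [i])).keys = d.keys :=
      PySem.Dict.keys_insert_of_contains d _ hc
    have hkmem : k ∈ d.keys := (PySem.Dict.contains_iff_mem_keys d k).mp hc
    rw [pv_maxLen_keys _ (by rw [hkeys]; exact hnd), hkeys, pv_maxLen_keys d hnd]
    rw [pv_foldmax_congr d.keys _
        (fun j => if j = k then ((d.getD k []).length : Int) + 1 else ((d.getD j []).length : Int)) 0
        (fun j _ => by
          rw [PySem.Dict.getD_insert]
          by_cases hjk : j = k
          · simp [hjk]
          · simp [hjk])]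
    exact pv_foldmax_bump d.keys (fun j => ((d.getD j []).length : Int)) k 0 hkmem
  · have hc' : d.contains k = false := by simpa using hc
    have hkeys : (d.insert k (d.getD k [] ++ [i])).keys = d.keys ++ [k] :=
      PySem.Dict.keys_insert_of_not_contains d _ hc'
    have hkmem : k ∉ d.keys := fun hm =>
      by rw [(PySem.Dict.contains_iff_mem_keys d k).mpr hm] at hc'; cases hc'
    have hgd : d.getD k [] = [] := PySem.Dict.getD_of_not_contains d [] hc'
    rw [pv_maxLen_keys _ (by
        rw [hkeys, List.nodup_append]
        refine ⟨hnd, List.nodup_singleton k, ?_⟩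
        intro a ha b hb
        have hb' : b = k := by simpa using hb
        exact fun e => hkmem (by rwa [e, hb'] at ha)),
      hkeys, List.foldl_append, pv_maxLen_keys d hnd]
    simp only [List.foldl_cons, List.foldl_nil]
    rw [PySem.Dict.getD_insert_self, hgd]
    rw [pv_foldmax_congr d.keys _ (fun j => ((d.getD j []).length : Int)) 0
        (fun j hj => by
          have hne : j ≠ k := fun e => hkmem (by rwa [e] at hj)
          rw [PySem.Dict.getD_insert, if_neg hne])]
    simp

-- A's per-step dict update equals the plain modify (insert-empty-then-append = append-with-default)
lemma pv_step_dict (d : PySem.Dict Int (List Int)) (k i : Int) :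
    ((if d.contains k then d else d.insert k []).modify k [] (fun v => v ++ [i]))
      = d.modify k [] (fun v => v ++ [i]) := by
  by_cases hc : d.contains k = true
  · rw [if_pos hc]
  · have hc' : d.contains k = false := by simpa using hc
    rw [if_neg (by simp [hc'])]
    unfold PySem.Dict.modify
    rw [PySem.Dict.getD_insert_self, PySem.Dict.insert_insert_self,
      PySem.Dict.getD_of_not_contains d [] hc']

-- A's whole loop, with the running max replaced by the bucket-length maximum of the final dict
lemma pv_main (l : List (Int × Int)) (d : PySem.Dict Int (List Int)) (c : Int)
    (hnd : d.keys.Nodup) (hinv : c = pvMaxLen d) :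
    l.foldl
      (fun (st : PySem.Dict Int (List Int) × Int) p =>
        let S := (if st.1.contains p.2 then st.1 else st.1.insert p.2 []).modify p.2 []
          (fun v => v ++ [p.1])
        (S, if ((S.getD p.2 []).length : Int) > st.2 then ((S.getD p.2 []).length : Int) else st.2))
      (d, c)
      = (let S := l.foldl (fun (d : PySem.Dict Int (List Int)) p => d.modify p.2 [] (fun v => v ++ [p.1])) d
         (S, pvMaxLen S)) := by
  induction l generalizing d c with
  | nil => simp [hinv]
  | cons p l ih =>
      simp only [List.foldl_cons]
      rw [pv_step_dict d p.2 p.1]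
      have hstep : d.modify p.2 [] (fun v => v ++ [p.1])
          = d.insert p.2 (d.getD p.2 [] ++ [p.1]) := rfl
      have hnd' : (d.modify p.2 [] (fun v => v ++ [p.1])).keys.Nodup := by
        rw [hstep]; exact PySem.Dict.nodup_keys_insert _ _ _ hnd
      have hlen : (((d.modify p.2 [] (fun v => v ++ [p.1])).getD p.2 []).length : Int)
          = ((d.getD p.2 []).length : Int) + 1 := by
        rw [PySem.Dict.getD_modify_self]; simp
      have hml : pvMaxLen (d.modify p.2 [] (fun v => v ++ [p.1]))
          = max (pvMaxLen d) (((d.getD p.2 []).length : Int) + 1) := by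
        rw [hstep]; exact pv_maxLen_insert d p.2 p.1 hnd
      rw [ih _ _ hnd' (by rw [hml, hlen, hinv]; omega)]

-- keys of A's grouping fold, nodup, in first-occurrence order = dedup all_labels
lemma pv_keys (all_labels : List Int) :
    ((PySem.List.enumerate all_labels).foldl
      (fun (d : PySem.Dict Int (List Int)) p => d.modify p.2 [] (fun v => v ++ [p.1]))
      PySem.Dict.empty).keys = PySem.List.dedup all_labels := by
  rw [PySem.Dict.keys_foldl_modify_key (PySem.List.enumerate all_labels)
        (fun p => p.2) [] (fun _ p v => v ++ [p.1]) PySem.Dict.empty,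
      PySem.List.map_snd_enumerate, PySem.List.dedup_eq_ofList,
      PySem.Set.ofList_eq_foldl, PySem.Dict.keys_empty]
  rfl

lemma pv_nodup_keys (all_labels : List Int) :
    ((PySem.List.enumerate all_labels).foldl
      (fun (d : PySem.Dict Int (List Int)) p => d.modify p.2 [] (fun v => v ++ [p.1]))
      PySem.Dict.empty).keys.Nodup := by
  apply PySem.Dict.nodup_keys_foldl_modify_key (PySem.List.enumerate all_labels)
    (fun p => p.2) [] (fun _ p v => v ++ [p.1]) PySem.Dict.empty
  rw [PySem.Dict.keys_empty]; exact List.nodup_nil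

-- each bucket of A's fold is the filtered index list B scans for
lemma pv_getD (all_labels : List Int) (k : Int) :
    ((PySem.List.enumerate all_labels).foldl
      (fun (d : PySem.Dict Int (List Int)) p => d.modify p.2 [] (fun v => v ++ [p.1]))
      PySem.Dict.empty).getD k []
    = ((PySem.List.enumerate all_labels).filter (fun p => p.2 == k)).map (fun p => p.1) := by
  have hsw : (PySem.List.enumerate all_labels).foldl
      (fun (d : PySem.Dict Int (List Int)) p => d.modify p.2 [] (fun v => v ++ [p.1]))
      PySem.Dict.empty
      = ((PySem.List.enumerate all_labels).map (fun p => (p.2, p.1))).foldl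
        (fun (d : PySem.Dict Int (List Int)) p => d.modify p.1 [] (fun v => v ++ [p.2]))
        PySem.Dict.empty := by
    rw [List.foldl_map]
  rw [hsw, PySem.Dict.getD_foldl_modify_append, PySem.Dict.getD_empty, List.nil_append,
    List.filter_map, List.map_map]
  rfl

-- A's grouped dict, as the label-major list B builds
lemma pv_items (all_labels : List Int) :
    ((PySem.List.enumerate all_labels).foldl
      (fun (d : PySem.Dict Int (List Int)) p => d.modify p.2 [] (fun v => v ++ [p.1]))
      PySem.Dict.empty).items
    = (PySem.List.dedup all_labels).map (fun lab =>
        (lab, ((PySem.List.enumerate all_labels).filter (fun p => p.2 == lab)).map (fun p => p.1))) := by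
  rw [PySem.Dict.items_eq_map_keys _ (pv_nodup_keys all_labels) ([] : List Int),
    pv_keys all_labels]
  exact List.map_congr_left (fun k _ => by rw [pv_getD all_labels k])

-- ===== VERDICT (by name: the statement is the Claim_ definition above) =====
theorem prepLabelsDS_spec : Claim_equal_prepLabelsDS := by
  intro all_labels num_samples batch_size _ _
  unfold Spec_prepLabelsDS prepLabelsDS prepLabelsDS_alt
  have hA : (PySem.List.pyRange 0 (PySem.List.len all_labels) 1).foldl
      (fun (st : PySem.Dict Int (List Int) × Int) idx =>
        let label := PySem.List.pyGetD all_labels idx 0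
        let S := if st.1.contains label then st.1 else st.1.insert label []
        let S := S.modify label [] (fun v => v ++ [idx])
        (S, if ((S.getD label []).length : Int) > st.2 then ((S.getD label []).length : Int) else st.2))
      (PySem.Dict.empty, (0 : Int))
      = (PySem.List.enumerate all_labels).foldl
        (fun (st : PySem.Dict Int (List Int) × Int) p =>
          let S := (if st.1.contains p.2 then st.1 else st.1.insert p.2 []).modify p.2 []
            (fun v => v ++ [p.1])
          (S, if ((S.getD p.2 []).length : Int) > st.2 then ((S.getD p.2 []).length : Int) else st.2))
        (PySem.Dict.empty, (0 : Int)) := by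
    rw [PySem.List.enumerate_eq_map_pyRange all_labels 0, List.foldl_map]
  rw [hA, pv_main (PySem.List.enumerate all_labels) PySem.Dict.empty 0
    (by rw [PySem.Dict.keys_empty]; exact List.nodup_nil) rfl]
  rw [Prod.mk.injEq]
  constructor
  · exact pv_items all_labels
  · cases num_samples with
    | some ns =>
        simp only [PySem.Dict.size, PySem.List.len, pv_items all_labels, List.length_map]
    | none =>
        unfold pvMaxLen
        simp only [PySem.Dict.values, pv_items all_labels, List.map_map]
        rfl
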